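-- pv_equiv track=rewrite | github.com/JasonFeng365/BuildYourOwnLabyrinth | MarkdownToLatex.py | replaceCode
-- ===== SOURCE A (Python) =====
-- codePrefix = "<b>"
--
-- suffix = "</b>"
--
-- def replaceCode(line):
-- 	stars = []
-- 	for i in range(len(line)):
-- 		if line[i]=='`': stars.append(i)
--
-- 	l = 0
-- 	count = 0
--
-- 	res = ""
-- 	for i in stars:
-- 		res += line[l:i]
-- 		count+=1
-- 		if count%2: res += codePrefix
-- 		else: res += suffix
-- 		l = i+1
-- 	res += line[l:]
-- 	return res
-- ===== SOURCE B (Python) =====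
-- codePrefix = "<b>"
--
-- suffix = "</b>"
--
-- def replaceCode(line):
-- 	out = []
-- 	inside = False
-- 	for ch in line:
-- 		if ch == '`':
-- 			out.append(suffix if inside else codePrefix)
-- 			inside = not inside
-- 		else:
-- 			out.append(ch)
-- 	return "".join(out)
-- ===== Notes on version B (the rewrite author's own statement) =====
-- stated objective: simpler
-- what changed: B replaces A's two staged passes (collect every backtick index, then re-walk the index list slicing the line between consecutive backticks by a parity counter) with one direct scan over the characters that copies each character and, at a backtick, emits <b> or </b> according to a boolean toggle — no index list, no slicing, no counter arithmetic.
import Mathlib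
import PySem

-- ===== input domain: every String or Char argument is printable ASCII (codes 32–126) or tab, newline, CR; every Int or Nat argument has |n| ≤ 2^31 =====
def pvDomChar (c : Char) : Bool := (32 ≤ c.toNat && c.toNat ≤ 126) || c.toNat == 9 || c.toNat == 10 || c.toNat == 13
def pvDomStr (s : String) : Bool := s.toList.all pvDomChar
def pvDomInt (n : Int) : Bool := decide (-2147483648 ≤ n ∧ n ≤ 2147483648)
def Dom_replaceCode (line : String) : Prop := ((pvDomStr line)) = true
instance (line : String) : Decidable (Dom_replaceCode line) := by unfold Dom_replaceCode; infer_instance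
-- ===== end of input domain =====

-- B replaces A's two staged passes (collect backtick indices, then slice the line between them)
-- with one direct character scan that emits <b>/</b> at each backtick via a boolean toggle; objective: simpler.

-- ===== PORT A =====
-- A: collect the indices of '`', then fold over them slicing the line between
-- consecutive backticks, appending "<b>"/"</b>" by the parity of a counter.
-- the body of A's second loop (state: l, count, res)
def stepA (s : List Char) (st : Int × Int × List Char) (i : Int) : Int × Int × List Char :=
  let res := st.2.2 ++ PySem.List.slice s (some st.1) (some i)
  let count := st.2.1 + 1
  let res := if PySem.Int.mod count 2 ≠ 0 then res ++ "<b>".toList else res ++ "</b>".toList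
  (i + 1, count, res)

def replaceCode (line : String) : String :=
  let s := line.toList
  let stars : List Int :=
    (PySem.List.pyRange 0 (s.length : Int) 1).foldl
      (fun acc i => if PySem.List.pyGet? s i = some '`' then acc ++ [i] else acc) []
  let st := stars.foldl (stepA s) (0, 0, [])
  String.mk (st.2.2 ++ PySem.List.slice s (some st.1) none)

-- ===== PORT B =====
-- B: out = []; inside = False; for ch in line: at '`' append the tag chosen by the
-- toggle and flip it, else append ch; return ''.join(out).
def replaceCode_alt (line : String) : String :=
  let st := line.toList.foldl
    (fun (st : List Char × Bool) ch =>
      if ch = '`' then (st.1 ++ (if st.2 then "</b>".toList else "<b>".toList), !st.2)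
      else (st.1 ++ [ch], st.2)) ([], false)
  String.mk st.1

-- ===== PRECONDITION & SPEC =====
def Spec_replaceCode (line : String) (out : String) : Prop := out = replaceCode_alt line
instance (line : String) (out : String) : Decidable (Spec_replaceCode line out) := by unfold Spec_replaceCode; infer_instance

-- ===== CLAIM (what is proved, stated in full; the proofs are below) =====
def Claim_equal_replaceCode : Prop := ∀ (line : String), Dom_replaceCode line → Spec_replaceCode line (replaceCode line)

-- ===== LEMMAS AND PROOFS =====

-- the common reference value: scan the characters once, toggling parity at each backtick
def tagA (k : Nat) : List Char := if k % 2 = 0 then "<b>".toList else "</b>".toList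

def specR : List Char → Nat → List Char
  | [], _ => []
  | c :: r, k => if c = '`' then tagA k ++ specR r (k + 1) else c :: specR r k

-- indices of backticks
def idxs (s : List Char) : List Nat :=
  (List.range s.length).filter (fun j => s[j]? = some '`')

theorem mod_natCast_two (k : Nat) : PySem.Int.mod (k : Int) 2 = ((k % 2 : Nat) : Int) := by
  unfold PySem.Int.mod
  rw [Int.fmod_eq_emod]
  rw [if_pos (Or.inl (by norm_num))]
  omega

theorem idxs_cons (c : Char) (r : List Char) :
    idxs (c :: r) = (if c = '`' then [0] else []) ++ (idxs r).map (· + 1) := by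
  unfold idxs
  simp only [List.length_cons, List.range_succ_eq_map, List.filter_cons, List.filter_map]
  simp only [List.getElem?_cons_zero, List.getElem?_cons_succ, Function.comp_def]
  split_ifs with h <;> simp_all <;> exact List.map_congr_left fun x _ => rfl

-- B's fold computes specR: the toggle equals the parity of the count of backticks seen
theorem B_fold (s : List Char) : ∀ (k : Nat) (acc : List Char),
    (s.foldl
      (fun (st : List Char × Bool) ch =>
        if ch = '`' then (st.1 ++ (if st.2 then "</b>".toList else "<b>".toList), !st.2)
        else (st.1 ++ [ch], st.2)) (acc, decide (k % 2 = 1))).1 = acc ++ specR s k := by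
  induction s with
  | nil => intro k acc; simp [specR]
  | cons c r ih =>
    intro k acc
    rw [List.foldl_cons]
    by_cases hc : c = '`'
    · subst hc
      rw [if_pos rfl]
      have ht : (!decide (k % 2 = 1)) = decide ((k + 1) % 2 = 1) := by
        by_cases h : k % 2 = 1 <;> simp [h] <;> omega
      simp only [ht]
      rw [ih (k + 1)]
      by_cases h : k % 2 = 1
      · simp [specR, tagA, h, (show k % 2 ≠ 0 by omega), List.append_assoc]
      · simp [specR, tagA, h, (show k % 2 = 0 by omega), List.append_assoc]
    · rw [if_neg hc, ih k]
      simp [specR, hc, List.append_assoc]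

-- A's first loop collects exactly the backtick indices
theorem stars_eq (s : List Char) :
    (PySem.List.pyRange 0 (s.length : Int) 1).foldl
      (fun acc i => if PySem.List.pyGet? s i = some '`' then acc ++ [i] else acc) [] =
    (idxs s).map (fun j : Nat => ((0 + j : Nat) : Int)) := by
  rw [PySem.List.foldl_append_ite_eq_filter, PySem.List.pyRange_one, List.nil_append]
  have h1 : ((s.length : Int) - 0).toNat = s.length := by omega
  rw [h1, List.filter_map]
  unfold idxs
  have hp : ∀ j ∈ List.range s.length,
      ((fun i => decide (PySem.List.pyGet? s i = some '`')) ∘ (fun k : Nat => (0 : Int) + k)) j =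
        decide (s[j]? = some '`') := by
    intro j _
    have h2 : (0 : Int) + (j : Int) = ((j : Nat) : Int) := by push_cast; ring
    simp only [Function.comp_def, h2, PySem.List.pyGet?_natCast]
  rw [List.filter_congr hp]
  apply List.map_congr_left
  intro j _
  push_cast; ring

-- A's second loop: fold over the backtick positions of the suffix t.drop l
theorem A_main (t : List Char) : ∀ (s : List Char) (l k : Nat) (res : List Char),
    t.drop l = s →
    (((idxs s).map (fun j : Nat => ((l + j : Nat) : Int))).foldl (stepA t)
        (((l : Nat) : Int), ((k : Nat) : Int), res)).2.2 ++
      PySem.List.slice t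
        (some ((((idxs s).map (fun j : Nat => ((l + j : Nat) : Int))).foldl (stepA t)
          (((l : Nat) : Int), ((k : Nat) : Int), res)).1)) none
    = res ++ specR s k := by
  intro s
  induction s with
  | nil =>
    intro l k res hdrop
    simp only [idxs, List.length_nil, List.range_zero, List.filter_nil, List.map_nil,
      List.foldl_nil]
    rw [PySem.List.slice_from_natCast, hdrop]
    simp [specR]
  | cons c r ih =>
    intro l k res hdrop
    have hdr : t.drop (l + 1) = r := by
      have := congrArg List.tail hdrop
      simpa [List.tail_drop] using this
    have hmap : ((idxs r).map (· + 1)).map (fun j : Nat => ((l + j : Nat) : Int)) =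
        (idxs r).map (fun j : Nat => ((l + 1 + j : Nat) : Int)) := by
      rw [List.map_map]; apply List.map_congr_left; intro j _
      simp only [Function.comp_def]; push_cast; ring
    rw [idxs_cons]
    by_cases hc : c = '`'
    · subst hc
      rw [if_pos rfl]
      simp only [List.singleton_append, List.map_cons, List.foldl_cons, hmap]
      have hstep : stepA t (((l : Nat) : Int), ((k : Nat) : Int), res) (((l + 0 : Nat) : Int)) =
          (((l + 1 : Nat) : Int), ((k + 1 : Nat) : Int), res ++ tagA k) := by
        unfold stepA
        rw [show ((l + 0 : Nat) : Int) = ((l : Nat) : Int) by push_cast; ring,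
          PySem.List.slice_natCast]
        simp only [Nat.sub_self, List.take_zero, List.append_nil]
        have hm : ((k : Nat) : Int) + 1 = ((k + 1 : Nat) : Int) := by push_cast; ring
        rw [hm, mod_natCast_two]
        by_cases hk : k % 2 = 0
        · rw [if_pos (show (((k + 1) % 2 : Nat) : Int) ≠ 0 by omega)]
          refine Prod.ext ?_ (Prod.ext ?_ ?_)
          · simp only; push_cast; ring
          · rfl
          · simp [tagA, hk]
        · rw [if_neg (show ¬ (((k + 1) % 2 : Nat) : Int) ≠ 0 by omega)]
          refine Prod.ext ?_ (Prod.ext ?_ ?_)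
          · simp only; push_cast; ring
          · rfl
          · simp [tagA, hk]
      rw [hstep, ih (l + 1) (k + 1) (res ++ tagA k) hdr]
      simp [specR]
    · rw [if_neg hc]
      simp only [List.nil_append, hmap]
      have hkey :
          ((((idxs r).map (fun j : Nat => ((l + 1 + j : Nat) : Int))).foldl (stepA t)
              (((l : Nat) : Int), ((k : Nat) : Int), res)).2.2 ++
            PySem.List.slice t
              (some ((((idxs r).map (fun j : Nat => ((l + 1 + j : Nat) : Int))).foldl (stepA t)
                (((l : Nat) : Int), ((k : Nat) : Int), res)).1)) none) =
          ((((idxs r).map (fun j : Nat => ((l + 1 + j : Nat) : Int))).foldl (stepA t)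
              (((l + 1 : Nat) : Int), ((k : Nat) : Int), res ++ [c])).2.2 ++
            PySem.List.slice t
              (some ((((idxs r).map (fun j : Nat => ((l + 1 + j : Nat) : Int))).foldl (stepA t)
                (((l + 1 : Nat) : Int), ((k : Nat) : Int), res ++ [c])).1)) none) := by
        cases hjs : idxs r with
        | nil =>
          simp only [hjs, List.map_nil, List.foldl_nil]
          rw [PySem.List.slice_from_natCast, PySem.List.slice_from_natCast, hdrop, hdr]
          simp
        | cons j0 js' =>
          simp only [hjs, List.map_cons, List.foldl_cons]
          have hfirst : stepA t (((l : Nat) : Int), ((k : Nat) : Int), res)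
                (((l + 1 + j0 : Nat) : Int)) =
              stepA t (((l + 1 : Nat) : Int), ((k : Nat) : Int), res ++ [c])
                (((l + 1 + j0 : Nat) : Int)) := by
            unfold stepA
            rw [PySem.List.slice_natCast, PySem.List.slice_natCast, hdrop, hdr]
            rw [show l + 1 + j0 - l = j0 + 1 by omega, show l + 1 + j0 - (l + 1) = j0 by omega,
              List.take_succ_cons]
            simp [List.append_assoc]
          rw [hfirst]
      rw [hkey, ih (l + 1) k (res ++ [c]) hdr]
      simp [specR, hc]

-- A computes specR
theorem A_eq_specR (line : String) : replaceCode line = String.mk (specR line.toList 0) := by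
  unfold replaceCode
  simp only
  rw [stars_eq]
  have h := A_main line.toList line.toList 0 0 [] (by simp)
  rw [show ((0 : Int), (0 : Int), ([] : List Char)) =
      ((((0 : Nat) : Int)), (((0 : Nat) : Int)), ([] : List Char)) by norm_num]
  rw [h]
  simp

-- B computes specR
theorem B_eq_specR (line : String) : replaceCode_alt line = String.mk (specR line.toList 0) := by
  unfold replaceCode_alt
  have h := B_fold line.toList 0 []
  simp only [show decide ((0 : Nat) % 2 = 1) = false by decide] at h
  simp only [h, List.nil_append]

-- ===== VERDICT (by name: the statement is the Claim_ definition above) =====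
theorem replaceCode_spec : Claim_equal_replaceCode := by
  intro line _
  unfold Spec_replaceCode
  rw [A_eq_specR, B_eq_specR]
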